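-- pv_equiv track=rewrite | github.com/jdanray/leetcode | removeZeros.py | removeZeros
-- ===== SOURCE A (Python) =====
-- def removeZeros(n):
-- 	p = 1
-- 	res = 0
-- 	while n > 0:
-- 		d = n % 10
-- 		if d != 0:
-- 			res += p * d
-- 			p *= 10
-- 		n //= 10
-- 	return res
-- ===== SOURCE B (Python) =====
-- def removeZeros(n):
--     # Top-down recursion via divmod: strip zero digits, keeping the rest in order.
--     if n <= 0:
--         return 0
--     q, d = divmod(n, 10)
--     t = removeZeros(q)
--     return t * 10 + d if d else t
-- ===== Notes on version B (the rewrite author's own statement) =====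
-- stated objective: simpler
-- what changed: Replaces the iterative loop that maintains a positional multiplier p and accumulator res with a top-down divmod recursion that rebuilds the number from its leading digits, eliminating the multiplier state.
import Mathlib
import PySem

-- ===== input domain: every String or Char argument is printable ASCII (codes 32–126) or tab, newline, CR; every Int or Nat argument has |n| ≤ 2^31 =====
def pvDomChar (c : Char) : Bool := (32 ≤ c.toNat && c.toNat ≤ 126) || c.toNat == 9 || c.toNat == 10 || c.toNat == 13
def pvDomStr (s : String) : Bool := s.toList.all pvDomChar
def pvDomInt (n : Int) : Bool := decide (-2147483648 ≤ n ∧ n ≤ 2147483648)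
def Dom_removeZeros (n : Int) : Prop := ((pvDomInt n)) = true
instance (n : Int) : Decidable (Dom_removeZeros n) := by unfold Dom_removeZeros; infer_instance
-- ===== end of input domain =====

-- B replaces A's loop (positional multiplier p, accumulator res) with a top-down
-- divmod recursion rebuilding the number from its leading digits; same cost, no speed claim.

-- ===== PORT A =====
-- the while loop of A, state (n, p, res)
def removeZerosLoop (n p res : Int) : Int :=
  if _h : 0 < n then
    let d := PySem.Int.mod n 10
    removeZerosLoop (PySem.Int.floordiv n 10)
      (if d ≠ 0 then p * 10 else p)
      (if d ≠ 0 then res + p * d else res)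
  else res
termination_by n.toNat
decreasing_by
  rw [PySem.Int.floordiv_eq_ediv_of_pos (by norm_num)]
  omega

def removeZeros (n : Int) : Int := removeZerosLoop n 1 0

-- ===== PORT B =====
def removeZeros_alt (n : Int) : Int :=
  if _h : n ≤ 0 then 0
  else
    let d := PySem.Int.mod n 10
    let t := removeZeros_alt (PySem.Int.floordiv n 10)
    if d ≠ 0 then t * 10 + d else t
termination_by n.toNat
decreasing_by
  rw [PySem.Int.floordiv_eq_ediv_of_pos (by norm_num)]
  omega

-- ===== PRECONDITION & SPEC =====
def Spec_removeZeros (n : Int) (out : Int) : Prop := out = removeZeros_alt n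
instance (n : Int) (out : Int) : Decidable (Spec_removeZeros n out) := by unfold Spec_removeZeros; infer_instance

-- ===== CLAIM (what is proved, stated in full; the proofs are below) =====
def Claim_equal_removeZeros : Prop := ∀ (n : Int), Dom_removeZeros n → Spec_removeZeros n (removeZeros n)

-- ===== LEMMAS AND PROOFS =====

-- Loop invariant: A's loop computes res + p * (B's recursion).
lemma removeZerosLoop_eq (k : Nat) :
    ∀ (n p res : Int), n.toNat ≤ k →
      removeZerosLoop n p res = res + p * removeZeros_alt n := by
  induction k with
  | zero =>
    intro n p res h
    have hn : ¬ 0 < n := by omega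
    rw [removeZerosLoop, removeZeros_alt]
    simp [hn, show n ≤ 0 by omega]
  | succ k ih =>
    intro n p res h
    by_cases hn : 0 < n
    · have hd : PySem.Int.floordiv n 10 = n / 10 :=
        PySem.Int.floordiv_eq_ediv_of_pos (by norm_num)
      have hk : (PySem.Int.floordiv n 10).toNat ≤ k := by rw [hd]; omega
      rw [removeZerosLoop, removeZeros_alt]
      simp only [hn, dif_pos, show ¬ n ≤ 0 by omega, dif_neg, not_false_iff]
      rw [ih _ _ _ hk]
      split_ifs with hz <;> ring
    · rw [removeZerosLoop, removeZeros_alt]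
      simp [hn, show n ≤ 0 by omega]

-- ===== VERDICT (by name: the statement is the Claim_ definition above) =====
theorem removeZeros_spec : Claim_equal_removeZeros := by
  intro n _
  unfold Spec_removeZeros removeZeros
  rw [removeZerosLoop_eq n.toNat n 1 0 le_rfl]
  ring
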